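-- pv_equiv track=rewrite | github.com/DYAI2025/ADS_Plilar_scraper | generate_ai_optimized_site.py | generate_feature_table
-- ===== SOURCE A (Python) =====
-- def convert_bool(value):
--     """Convert CSV boolean to Python boolean"""
--     if not value or value == '':
--         return False
--     if isinstance(value, bool):
--         return value
--     if isinstance(value, str):
--         return value.upper() == 'TRUE'
--     return bool(value)
--
-- def generate_feature_table(locations):
--     """Generate comprehensive feature comparison table"""
--     rows = []
--     for loc in locations:
--         toilets = "✓" if convert_bool(loc.get('feature_toilets')) else "—"
--         wheelchair = "✓" if convert_bool(loc.get('feature_wheelchair_accessible')) else "—"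
--         kids = "✓" if convert_bool(loc.get('feature_kids_friendly')) else "—"
--         dogs = "✓" if convert_bool(loc.get('feature_dogs_allowed')) else "—"
--         parking = "✓" if convert_bool(loc.get('feature_parking')) else "—"
--         free = "✓" if not convert_bool(loc.get('feature_fee')) else "—"
--         restaurant = "✓" if convert_bool(loc.get('feature_restaurant')) else "—"
--         historic = "✓" if convert_bool(loc.get('feature_historic')) else "—"
--
--         row = f"""
--         <tr>
--           <td><strong>{loc['name']}</strong></td>
--           <td class="{'check' if toilets == '✓' else 'no-check'}">{toilets}</td>
--           <td class="{'check' if wheelchair == '✓' else 'no-check'}">{wheelchair}</td>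
--           <td class="{'check' if kids == '✓' else 'no-check'}">{kids}</td>
--           <td class="{'check' if dogs == '✓' else 'no-check'}">{dogs}</td>
--           <td class="{'check' if parking == '✓' else 'no-check'}">{parking}</td>
--           <td class="{'check' if free == '✓' else 'no-check'}">{free}</td>
--           <td class="{'check' if restaurant == '✓' else 'no-check'}">{restaurant}</td>
--           <td class="{'check' if historic == '✓' else 'no-check'}">{historic}</td>
--         </tr>
--         """
--         rows.append(row)
--
--     table_html = f"""
--     <div class="feature-table">
--       <h2>Übersicht aller Ausstattungsmerkmale</h2>
--       <p style="margin-bottom: 20px; color: var(--text-light);">Alle {len(locations)} Locations im direkten Vergleich. Filtern Sie oben nach Ihren Wünschen oder nutzen Sie diese Tabelle zur Orientierung.</p>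
--       <table>
--         <thead>
--           <tr>
--             <th>Location</th>
--             <th>Toiletten</th>
--             <th>Barrierefrei</th>
--             <th>Kinder</th>
--             <th>Hunde</th>
--             <th>Parkplatz</th>
--             <th>Kostenfrei</th>
--             <th>Gastronomie</th>
--             <th>Historisch</th>
--           </tr>
--         </thead>
--         <tbody>
--           {''.join(rows)}
--         </tbody>
--       </table>
--     </div>
--     """
--     return table_html
-- ===== SOURCE B (Python) =====
-- # Column-major staged construction: one pass collects the names, one pass per
-- # feature builds that column of marks, and the rows are then assembled by index
-- # across the transposed columns (A builds each row in a single row-major pass).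
--
-- FEATURES = [
--     ("feature_toilets", False),
--     ("feature_wheelchair_accessible", False),
--     ("feature_kids_friendly", False),
--     ("feature_dogs_allowed", False),
--     ("feature_parking", False),
--     ("feature_fee", True),          # "Kostenfrei" shows the check when there is NO fee
--     ("feature_restaurant", False),
--     ("feature_historic", False),
-- ]
--
--
-- def _mark(raw, invert):
--     on = raw.upper() == "TRUE"
--     return "✓" if on != invert else "—"
--
--
-- def _cell(m):
--     return '          <td class="%s">%s</td>\n' % ("check" if m == "✓" else "no-check", m)
--
--
-- def _row(name, marks):
--     return ("\n        <tr>\n          <td><strong>" + name + "</strong></td>\n"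
--             + "".join(_cell(m) for m in marks) + "        </tr>\n        ")
--
--
-- def generate_feature_table(locations):
--     names = [loc["name"] for loc in locations]
--     cols = [[_mark(loc.get(k, ""), inv) for loc in locations] for k, inv in FEATURES]
--     body = "".join(_row(names[i], [c[i] for c in cols]) for i in range(len(locations)))
--     return (
--         '\n    <div class="feature-table">\n'
--         "      <h2>Übersicht aller Ausstattungsmerkmale</h2>\n"
--         '      <p style="margin-bottom: 20px; color: var(--text-light);">Alle '
--         + str(len(locations))
--         + " Locations im direkten Vergleich. Filtern Sie oben nach Ihren Wünschen oder nutzen Sie diese Tabelle zur Orientierung.</p>\n"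
--         "      <table>\n        <thead>\n          <tr>\n"
--         "            <th>Location</th>\n            <th>Toiletten</th>\n            <th>Barrierefrei</th>\n            <th>Kinder</th>\n            <th>Hunde</th>\n            <th>Parkplatz</th>\n            <th>Kostenfrei</th>\n            <th>Gastronomie</th>\n            <th>Historisch</th>\n"
--         "          </tr>\n        </thead>\n        <tbody>\n          "
--         + body
--         + "\n        </tbody>\n      </table>\n    </div>\n    "
--     )
-- ===== Notes on version B (the rewrite author's own statement) =====
-- stated objective: alternative
-- what changed: Replaces A's single row-major pass (eight hand-written mark variables and cells per location) with a column-major staged construction: one pass collects the names, one pass per feature descriptor builds that column of marks, and the rows are assembled afterwards by index across the transposed columns.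
import Mathlib
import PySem

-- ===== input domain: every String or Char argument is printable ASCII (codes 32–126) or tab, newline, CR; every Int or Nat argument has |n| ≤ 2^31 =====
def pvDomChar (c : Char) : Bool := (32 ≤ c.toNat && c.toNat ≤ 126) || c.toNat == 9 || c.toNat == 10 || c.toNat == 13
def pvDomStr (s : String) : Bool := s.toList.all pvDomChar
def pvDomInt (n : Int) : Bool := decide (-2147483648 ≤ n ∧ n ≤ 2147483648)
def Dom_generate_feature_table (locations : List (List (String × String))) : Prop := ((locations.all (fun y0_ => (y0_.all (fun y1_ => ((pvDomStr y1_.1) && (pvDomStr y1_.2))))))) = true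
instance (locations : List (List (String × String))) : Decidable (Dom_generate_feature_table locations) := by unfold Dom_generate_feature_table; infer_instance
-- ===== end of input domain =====

-- B builds the table column-major in staged passes (names, then one mark column
-- per feature, then rows zipped by index) instead of A's single row-major pass
-- (objective: alternative decomposition, same cost).

-- ===== PORT A =====
-- convert_bool, restricted to the values a str->str dict's .get can produce (None or a string)
def convertBool (value : Option String) : Bool :=
  match value with
  | none => false                                   -- 'if not value': None is falsy
  | some s => if s = "" then false                  -- 'not value or value == ""' for a string
              else PySem.Str.upper s == "TRUE"      -- 'value.upper() == "TRUE"'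

-- the row f-string for one loc (f-string ported as concatenation of its literal chunks)
def rowA (loc : List (String × String)) : String :=
  let d : PySem.Dict String String := PySem.Dict.mk loc
  let toilets : String := if convertBool (d.get? "feature_toilets") then "✓" else "—"
  let wheelchair : String := if convertBool (d.get? "feature_wheelchair_accessible") then "✓" else "—"
  let kids : String := if convertBool (d.get? "feature_kids_friendly") then "✓" else "—"
  let dogs : String := if convertBool (d.get? "feature_dogs_allowed") then "✓" else "—"
  let parking : String := if convertBool (d.get? "feature_parking") then "✓" else "—"
  let free : String := if !convertBool (d.get? "feature_fee") then "✓" else "—"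
  let restaurant : String := if convertBool (d.get? "feature_restaurant") then "✓" else "—"
  let historic : String := if convertBool (d.get? "feature_historic") then "✓" else "—"
  "\n        <tr>\n          <td><strong>" ++ (d.get? "name").getD "" ++ "</strong></td>\n"
    -- loc['name'] raises KeyError when absent: excluded by Pre_, .getD "" never observed
    ++ ("          <td class=\"" ++ (if toilets = "✓" then "check" else "no-check") ++ "\">" ++ toilets ++ "</td>\n")
    ++ ("          <td class=\"" ++ (if wheelchair = "✓" then "check" else "no-check") ++ "\">" ++ wheelchair ++ "</td>\n")
    ++ ("          <td class=\"" ++ (if kids = "✓" then "check" else "no-check") ++ "\">" ++ kids ++ "</td>\n")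
    ++ ("          <td class=\"" ++ (if dogs = "✓" then "check" else "no-check") ++ "\">" ++ dogs ++ "</td>\n")
    ++ ("          <td class=\"" ++ (if parking = "✓" then "check" else "no-check") ++ "\">" ++ parking ++ "</td>\n")
    ++ ("          <td class=\"" ++ (if free = "✓" then "check" else "no-check") ++ "\">" ++ free ++ "</td>\n")
    ++ ("          <td class=\"" ++ (if restaurant = "✓" then "check" else "no-check") ++ "\">" ++ restaurant ++ "</td>\n")
    ++ ("          <td class=\"" ++ (if historic = "✓" then "check" else "no-check") ++ "\">" ++ historic ++ "</td>\n")
    ++ "        </tr>\n        "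

def generate_feature_table (locations : List (List (String × String))) : String :=
  let rows : List String := locations.map rowA
  "\n    <div class=\"feature-table\">\n      <h2>Übersicht aller Ausstattungsmerkmale</h2>\n      <p style=\"margin-bottom: 20px; color: var(--text-light);\">Alle "
    ++ PySem.Int.toStr (locations.length : Int)
    ++ " Locations im direkten Vergleich. Filtern Sie oben nach Ihren Wünschen oder nutzen Sie diese Tabelle zur Orientierung.</p>\n      <table>\n        <thead>\n          <tr>\n            <th>Location</th>\n            <th>Toiletten</th>\n            <th>Barrierefrei</th>\n            <th>Kinder</th>\n            <th>Hunde</th>\n            <th>Parkplatz</th>\n            <th>Kostenfrei</th>\n            <th>Gastronomie</th>\n            <th>Historisch</th>\n          </tr>\n        </thead>\n        <tbody>\n          "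
    ++ String.join rows      -- ''.join(rows)
    ++ "\n        </tbody>\n      </table>\n    </div>\n    "

-- ===== PORT B =====
def featuresB : List (String × Bool) :=
  [("feature_toilets", false), ("feature_wheelchair_accessible", false),
   ("feature_kids_friendly", false), ("feature_dogs_allowed", false),
   ("feature_parking", false), ("feature_fee", true),
   ("feature_restaurant", false), ("feature_historic", false)]

def markB (raw : String) (invert : Bool) : String :=
  let on : Bool := PySem.Str.upper raw == "TRUE"
  if on != invert then "✓" else "—"

def cellB (m : String) : String :=
  "          <td class=\"" ++ (if m = "✓" then "check" else "no-check") ++ "\">" ++ m ++ "</td>\n"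

def rowRenderB (name : String) (marks : List String) : String :=
  "\n        <tr>\n          <td><strong>" ++ name ++ "</strong></td>\n"
    ++ String.join (marks.map cellB) ++ "        </tr>\n        "

def generate_feature_table_alt (locations : List (List (String × String))) : String :=
  let names : List String := locations.map (fun loc => ((PySem.Dict.mk loc).get? "name").getD "")
  -- loc["name"] raises KeyError when absent: excluded by Pre_, .getD "" never observed
  let cols : List (List String) :=
    featuresB.map (fun kv => locations.map (fun loc => markB ((PySem.Dict.mk loc).getD kv.1 "") kv.2))
  let body : String := String.join ((List.range locations.length).map
    (fun i => rowRenderB (names.getD i "") (cols.map (fun c => c.getD i ""))))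
  "\n    <div class=\"feature-table\">\n      <h2>Übersicht aller Ausstattungsmerkmale</h2>\n      <p style=\"margin-bottom: 20px; color: var(--text-light);\">Alle "
    ++ PySem.Int.toStr (locations.length : Int)
    ++ " Locations im direkten Vergleich. Filtern Sie oben nach Ihren Wünschen oder nutzen Sie diese Tabelle zur Orientierung.</p>\n      <table>\n        <thead>\n          <tr>\n            <th>Location</th>\n            <th>Toiletten</th>\n            <th>Barrierefrei</th>\n            <th>Kinder</th>\n            <th>Hunde</th>\n            <th>Parkplatz</th>\n            <th>Kostenfrei</th>\n            <th>Gastronomie</th>\n            <th>Historisch</th>\n          </tr>\n        </thead>\n        <tbody>\n          "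
    ++ body
    ++ "\n        </tbody>\n      </table>\n    </div>\n    "

-- ===== PRECONDITION & SPEC =====
-- Pre_ excludes exactly the locs without a 'name' key, on which Python A raises KeyError.
def Pre_generate_feature_table (locations : List (List (String × String))) : Prop :=
  (locations.all (fun loc => ((PySem.Dict.mk loc).get? "name").isSome)) = true
instance (locations : List (List (String × String))) : Decidable (Pre_generate_feature_table locations) := by unfold Pre_generate_feature_table; infer_instance

def pvWitness_generate_feature_table : (List (List (String × String))) :=
  [[("name", "Schloss"), ("feature_fee", "TRUE"), ("feature_dogs_allowed", "true")],
   [("name", "Park"), ("feature_toilets", "FALSE")]]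

def Spec_generate_feature_table (locations : List (List (String × String))) (out : String) : Prop := out = generate_feature_table_alt locations
instance (locations : List (List (String × String))) (out : String) : Decidable (Spec_generate_feature_table locations out) := by unfold Spec_generate_feature_table; infer_instance

-- ===== CLAIM =====
def Claim_equal_generate_feature_table : Prop := ∀ (locations : List (List (String × String))), Dom_generate_feature_table locations → Pre_generate_feature_table locations → Spec_generate_feature_table locations (generate_feature_table locations)

-- ===== LEMMAS AND PROOFS =====
theorem convertBool_eq (o : Option String) :
    convertBool o = (PySem.Str.upper (o.getD "") == "TRUE") := by
  cases o with
  | none => decide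
  | some s =>
    by_cases h : s = ""
    · subst h; decide
    · simp [convertBool, h]

theorem mark_bool (b : Bool) :
    ((if (b != false) = true then "✓" else "—") = if b = true then "✓" else "—") ∧
    ((if (b != true) = true then "✓" else "—") = if (!b) = true then "✓" else "—") := by
  cases b <;> simp

theorem mark_eq (d : PySem.Dict String String) (k : String) :
    markB (d.getD k "") false = (if convertBool (d.get? k) then "✓" else "—") ∧
    markB (d.getD k "") true = (if !convertBool (d.get? k) then "✓" else "—") := by
  simp only [markB, convertBool_eq, PySem.Dict.getD]
  exact mark_bool _

-- one assembled row of B equals A's row for the same loc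
theorem row_eq (loc : List (String × String)) :
    rowRenderB (((PySem.Dict.mk loc).get? "name").getD "")
      (featuresB.map (fun kv => markB ((PySem.Dict.mk loc).getD kv.1 "") kv.2)) = rowA loc := by
  simp [rowRenderB, rowA, featuresB, cellB, String.join,
    (mark_eq (PySem.Dict.mk loc) _).1, (mark_eq (PySem.Dict.mk loc) _).2,
    String.append_assoc]

theorem getD_map_lt {α β : Type} (f : α → β) (xs : List α) (i : Nat) (h : i < xs.length)
    (d : β) : (xs.map f).getD i d = f xs[i] := by
  simp [List.getD, List.getElem?_map, List.getElem?_eq_getElem h]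

-- the index-zipped body equals A's row-major list of rows
theorem body_eq (locations : List (List (String × String))) :
    (List.range locations.length).map
      (fun i => rowRenderB ((locations.map (fun loc => ((PySem.Dict.mk loc).get? "name").getD "")).getD i "")
        ((featuresB.map (fun kv => locations.map (fun loc => markB ((PySem.Dict.mk loc).getD kv.1 "") kv.2))).map
          (fun c => c.getD i ""))) = locations.map rowA := by
  apply List.ext_getElem
  · simp
  · intro i h1 h2
    simp only [List.getElem_map, List.getElem_range]
    have hi : i < locations.length := by simpa using h2
    rw [getD_map_lt _ _ _ hi, List.map_map]
    have hfun : ((fun (c : List String) => c.getD i "") ∘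
        (fun (kv : String × Bool) =>
          locations.map (fun loc => markB ((PySem.Dict.mk loc).getD kv.1 "") kv.2))) =
        (fun (kv : String × Bool) => markB ((PySem.Dict.mk locations[i]).getD kv.1 "") kv.2) := by
      funext kv
      exact getD_map_lt _ _ _ hi _
    rw [hfun, row_eq]

-- ===== VERDICT =====
theorem generate_feature_table_spec : Claim_equal_generate_feature_table := by
  intro locations _ _
  show generate_feature_table locations = generate_feature_table_alt locations
  unfold generate_feature_table generate_feature_table_alt
  simp only [body_eq]
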